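-- pv_equiv track=rewrite | github.com/Skywalker2012/qiskit-terra | qiskit/transpiler/paulihedral.py | block_lex_key
-- ===== SOURCE A (Python) =====
-- def block_lex_key(pauli_block):
--     value = 0
--     '''q0 corresponds to the right-most pauli op'''
--     for op in pauli_block[0][0]:
--         value *= 4
--         if op == 'I':
--             value += 0
--         elif op == 'X':
--             value += 1
--         elif op == 'Y':
--             value += 2
--         elif op == 'Z':
--             value += 3
--     return value
-- ===== SOURCE B (Python) =====
-- _DIGIT = {'I': '0', 'X': '1', 'Y': '2', 'Z': '3'}
--
-- def block_lex_key(pauli_block):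
--     s = ''.join(_DIGIT.get(op, '0') for op in pauli_block[0][0])
--     return int(s, 4) if s else 0
-- ===== Notes on version B (the rewrite author's own statement) =====
-- stated objective: idiomatic
-- what changed: Replaces the manual Horner loop with an if/elif ladder by a table-driven translation to a base-4 numeral string parsed by int(s, 4).
-- outside the precondition, e.g. on block_lex_key([[]]): A raises IndexError, B raises IndexError
import Mathlib
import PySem

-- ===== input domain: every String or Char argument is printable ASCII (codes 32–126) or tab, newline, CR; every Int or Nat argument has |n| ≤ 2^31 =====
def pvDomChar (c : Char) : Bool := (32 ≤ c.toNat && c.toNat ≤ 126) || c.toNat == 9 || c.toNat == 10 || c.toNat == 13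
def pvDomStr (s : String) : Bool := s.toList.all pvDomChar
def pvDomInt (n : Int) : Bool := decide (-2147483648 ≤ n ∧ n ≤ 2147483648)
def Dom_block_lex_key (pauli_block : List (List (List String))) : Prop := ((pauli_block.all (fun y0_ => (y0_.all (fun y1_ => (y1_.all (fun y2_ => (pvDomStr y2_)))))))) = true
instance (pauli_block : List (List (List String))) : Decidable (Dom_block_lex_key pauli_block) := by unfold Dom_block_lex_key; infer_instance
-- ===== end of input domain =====

-- B replaces A's Horner loop with an if/elif ladder by a one-shot translation of the ops
-- to a base-4 digit string parsed in one call (idiomatic; same return value on Pre_).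

-- ===== PORT A =====
def block_lex_key (pauli_block : List (List (List String))) : Int :=
  -- pauli_block[0][0]; none = IndexError, excluded by Pre_
  match (PySem.List.pyGet? pauli_block 0).bind (fun r => PySem.List.pyGet? r 0) with
  | none => 0
  | some ops =>
    ops.foldl (fun value op =>
      let v := value * 4
      if op = "I" then v + 0
      else if op = "X" then v + 1
      else if op = "Y" then v + 2
      else if op = "Z" then v + 3
      else v) 0

-- ===== PORT B =====
-- _DIGIT.get(op, '0')
def pvDigit (op : String) : Char :=
  if op = "I" then '0' else if op = "X" then '1' else if op = "Y" then '2'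
  else if op = "Z" then '3' else '0'

-- hand port of int(s, 4): exact on strings of digits '0'..'3', the only strings B builds
def pvParse4 (s : List Char) : Int :=
  s.foldl (fun acc c => acc * 4 + ((c.toNat : Int) - 48)) 0

def block_lex_key_alt (pauli_block : List (List (List String))) : Int :=
  match (PySem.List.pyGet? pauli_block 0).bind (fun r => PySem.List.pyGet? r 0) with
  | none => 0
  | some ops =>
    let s := ops.map pvDigit
    if s.isEmpty then 0 else pvParse4 s

-- ===== PRECONDITION & SPEC =====
-- Pre_ excludes exactly the inputs where pauli_block[0][0] raises IndexError in both programs.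
def Pre_block_lex_key (pauli_block : List (List (List String))) : Prop :=
  pauli_block ≠ [] ∧ pauli_block.headI ≠ []
instance (pauli_block : List (List (List String))) : Decidable (Pre_block_lex_key pauli_block) := by unfold Pre_block_lex_key; infer_instance

def pvWitness_block_lex_key : List (List (List String)) := [[["X", "I", "Z"]]]

def Spec_block_lex_key (pauli_block : List (List (List String))) (out : Int) : Prop := out = block_lex_key_alt pauli_block
instance (pauli_block : List (List (List String))) (out : Int) : Decidable (Spec_block_lex_key pauli_block out) := by unfold Spec_block_lex_key; infer_instance

-- ===== CLAIM (what is proved, stated in full; the proofs are below) =====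
def Claim_equal_block_lex_key : Prop := ∀ (pauli_block : List (List (List String))), Dom_block_lex_key pauli_block → Pre_block_lex_key pauli_block → Spec_block_lex_key pauli_block (block_lex_key pauli_block)

-- ===== LEMMAS AND PROOFS =====

theorem pvHorner_eq_parse (ops : List String) (acc : Int) :
    ops.foldl (fun value op =>
      let v := value * 4
      if op = "I" then v + 0
      else if op = "X" then v + 1
      else if op = "Y" then v + 2
      else if op = "Z" then v + 3
      else v) acc
    = (ops.map pvDigit).foldl (fun acc c => acc * 4 + ((c.toNat : Int) - 48)) acc := by
  induction ops generalizing acc with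
  | nil => rfl
  | cons op rest ih =>
    simp only [List.foldl, List.map]
    rw [ih]
    congr 1
    unfold pvDigit
    split_ifs <;>
      norm_num [show '0'.toNat = 48 from by decide, show '1'.toNat = 49 from by decide,
                show '2'.toNat = 50 from by decide, show '3'.toNat = 51 from by decide]

theorem block_lex_key_eq (pauli_block : List (List (List String))) :
    block_lex_key pauli_block = block_lex_key_alt pauli_block := by
  unfold block_lex_key block_lex_key_alt
  cases h : (PySem.List.pyGet? pauli_block 0).bind (fun r => PySem.List.pyGet? r 0) with
  | none => rfl
  | some ops =>
    simp only []
    rw [pvHorner_eq_parse]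
    cases ops with
    | nil => rfl
    | cons a t => simp [pvParse4]

-- ===== VERDICT (by name: the statement is the Claim_ definition above) =====
theorem block_lex_key_spec : Claim_equal_block_lex_key := by
  intro pb _ _
  unfold Spec_block_lex_key
  exact block_lex_key_eq pb
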